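-- pv_equiv track=rewrite | github.com/PPZeen/Comprog_graders | 09_MoreDC_34.py | pattern3
-- ===== SOURCE A (Python) =====
-- def pattern3( N ):
--     tab = []
--     k=1
--     for i in range(N):
--         subtab = [0]*i
--         for j in range(i,N):
--             subtab.append(k)
--             k+=1
--         tab.append(subtab)
--     return tab
-- ===== SOURCE B (Python) =====
-- def pattern3(N):
--     # Each row computed independently via a closed-form start value,
--     # instead of threading a running counter across rows.
--     return [[0] * i + list(range(1 + i * N - i * (i - 1) // 2,
--                                  1 + i * N - i * (i - 1) // 2 + N - i))
--             for i in range(N)]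
-- ===== Notes on version B (the rewrite author's own statement) =====
-- stated objective: alternative
-- what changed: Replaced the cross-row running counter with a closed-form start value 1 + i*N - i*(i-1)//2 per row, so every row is built independently (comprehension over range with a range slice) instead of by a stateful nested append loop.
import Mathlib
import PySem

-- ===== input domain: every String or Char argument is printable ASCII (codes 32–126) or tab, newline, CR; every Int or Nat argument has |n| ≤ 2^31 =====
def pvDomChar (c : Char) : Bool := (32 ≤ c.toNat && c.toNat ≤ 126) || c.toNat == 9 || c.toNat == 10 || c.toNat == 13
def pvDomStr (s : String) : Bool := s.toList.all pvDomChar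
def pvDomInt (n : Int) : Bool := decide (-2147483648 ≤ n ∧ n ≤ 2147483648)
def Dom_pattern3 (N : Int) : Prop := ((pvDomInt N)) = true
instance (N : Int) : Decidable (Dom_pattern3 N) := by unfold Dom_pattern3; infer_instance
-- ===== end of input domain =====

-- B replaces A's cross-row running counter with a closed-form per-row start value; alternative decomposition, same cost.


-- ===== PORT A =====
-- literal port of A: tab=[], k=1; for i in range(N): subtab=[0]*i; for j in range(i,N): subtab.append(k); k+=1; tab.append(subtab)
-- one iteration of A's outer loop on the state (tab, k)
def pvStepA (N : Int) (st : List (List Int) × Int) (i : Int) : List (List Int) × Int :=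
  let inner := (PySem.List.pyRange i N 1).foldl
    (fun (p : List Int × Int) _ => (p.1 ++ [p.2], p.2 + 1))
    (List.replicate i.toNat 0, st.2)
  (st.1 ++ [inner.1], inner.2)

def pattern3 (N : Int) : List (List Int) :=
  ((PySem.List.pyRange 0 N 1).foldl (pvStepA N) ([], 1)).1

-- ===== PORT B =====
-- closed-form start of row i: 1 + i*N - i*(i-1)//2
def pvStart (N i : Int) : Int := 1 + i * N - PySem.Int.floordiv (i * (i - 1)) 2
-- row i: [0]*i + list(range(start, start + N - i))
def pvRow (N i : Int) : List Int :=
  List.replicate i.toNat 0 ++ PySem.List.pyRange (pvStart N i) (pvStart N i + N - i) 1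
def pattern3_alt (N : Int) : List (List Int) :=
  (PySem.List.pyRange 0 N 1).map (fun i => pvRow N i)

-- ===== PRECONDITION & SPEC =====
def Spec_pattern3 (N : Int) (out : List (List Int)) : Prop := out = pattern3_alt N
instance (N : Int) (out : List (List Int)) : Decidable (Spec_pattern3 N out) := by unfold Spec_pattern3; infer_instance

-- ===== CLAIM (what is proved, stated in full; the proofs are below) =====
def Claim_equal_pattern3 : Prop := ∀ (N : Int), Dom_pattern3 N → Spec_pattern3 N (pattern3 N)

-- ===== LEMMAS AND PROOFS =====

-- A's inner loop: appending the running counter once per element grows the list by a counter range.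
lemma inner_loop (l : List Int) (s : List Int) (k : Int) :
    l.foldl (fun (p : List Int × Int) _ => (p.1 ++ [p.2], p.2 + 1)) (s, k)
      = (s ++ PySem.List.pyRange k (k + l.length) 1, k + l.length) := by
  induction l generalizing s k with
  | nil => simp [PySem.List.pyRange_one_eq_nil (le_refl k)]
  | cons x t ih =>
    simp only [List.foldl_cons, ih (s ++ [k]) (k + 1), List.length_cons]
    rw [PySem.List.pyRange_one_cons (a := k) (b := k + (t.length + 1 : Nat)) (by push_cast; omega)]
    have hc : k + ((t.length : Int) + 1) = k + 1 + (t.length : Int) := by ring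
    push_cast
    rw [hc]
    simp

-- the closed-form start advances by one row's length
lemma pvStart_succ (N i : Int) : pvStart N i + N - i = pvStart N (i + 1) := by
  obtain ⟨m, hm⟩ : Even (i * (i - 1)) := by
    have := Int.even_mul_succ_self (i - 1)
    simpa [mul_comm, sub_add_cancel] using this
  obtain ⟨m', hm'⟩ : Even ((i + 1) * i) := by
    have := Int.even_mul_succ_self i
    simpa [mul_comm] using this
  have h1 : PySem.Int.floordiv (i * (i - 1)) 2 = m := by
    rw [PySem.Int.floordiv_eq_ediv_of_pos (by omega)]; omega
  have h2 : PySem.Int.floordiv ((i + 1) * (i + 1 - 1)) 2 = m' := by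
    rw [PySem.Int.floordiv_eq_ediv_of_pos (by omega)]
    have : (i + 1) * (i + 1 - 1) = (i + 1) * i := by ring
    rw [this]; omega
  have hd : (i + 1) * i = i * (i - 1) + 2 * i := by ring
  have hmm : m + i = m' := by omega
  simp only [pvStart, h1, h2]
  linear_combination -hmm

-- one step of A with the counter at its closed-form value produces B's row and advances the closed form
lemma stepA_eq (N a : Int) (_ha : 0 ≤ a) (haN : a < N) (s : List (List Int)) :
    pvStepA N (s, pvStart N a) a = (s ++ [pvRow N a], pvStart N (a + 1)) := by
  unfold pvStepA
  rw [inner_loop]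
  have hlen : ((PySem.List.pyRange a N 1).length : Int) = N - a := by
    rw [PySem.List.length_pyRange_one]; omega
  have hk : pvStart N a + ((PySem.List.pyRange a N 1).length : Int) = pvStart N (a + 1) := by
    rw [hlen]
    have := pvStart_succ N a
    omega
  have hrow : List.replicate a.toNat (0 : Int) ++
      PySem.List.pyRange (pvStart N a) (pvStart N a + (PySem.List.pyRange a N 1).length) 1
      = pvRow N a := by
    rw [pvRow, hlen]
    have : pvStart N a + (N - a) = pvStart N a + N - a := by ring
    rw [this]
  rw [hrow, hk]

-- A's outer loop, with the counter at its closed-form value, produces B's rows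
lemma outer_loop (N : Int) (n : Nat) : ∀ (a : Int), 0 ≤ a → a + n = N →
    ∀ (s : List (List Int)),
    ((PySem.List.pyRange a N 1).foldl (pvStepA N) (s, pvStart N a)).1
      = s ++ (PySem.List.pyRange a N 1).map (fun i => pvRow N i) := by
  induction n with
  | zero =>
    intro a ha hN s
    rw [PySem.List.pyRange_one_eq_nil (by omega)]
    simp
  | succ n ih =>
    intro a ha hN s
    rw [PySem.List.pyRange_one_cons (by omega)]
    rw [List.foldl_cons, stepA_eq N a ha (by omega) s,
      ih (a + 1) (by omega) (by omega) (s ++ [pvRow N a])]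
    simp

lemma pvStart_zero (N : Int) : pvStart N 0 = 1 := by
  simp [pvStart, PySem.Int.floordiv]

-- ===== VERDICT (by name: the statement is the Claim_ definition above) =====
theorem pattern3_spec : Claim_equal_pattern3 := by
  intro N _
  unfold Spec_pattern3 pattern3 pattern3_alt
  by_cases hN : 0 ≤ N
  · have h := outer_loop N N.toNat 0 (le_refl 0) (by omega) []
    rw [pvStart_zero] at h
    simpa using h
  · rw [PySem.List.pyRange_one_eq_nil (by omega)]
    simp
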